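-- pv_equiv track=rewrite | github.com/dilavus/TranscriptAI | main.py | audioRanges
-- ===== SOURCE A (Python) =====
-- def audioRanges(recommended_section_length, new_sound, silence_split=False):
--     duration = len(new_sound)
--     range_list = []
--     section_length = recommended_section_length * 1000
--     start_range = 0
--     while duration != 0:
--         if duration <= section_length:
--             section = duration
--         else:
--             section = section_length
--         stop_range = start_range + section
--         range_list.append(start_range)
--         range_list.append(stop_range)
--         start_range = stop_range
--         duration -= section
--     return range_list
-- ===== SOURCE B (Python) =====
-- def audioRanges(recommended_section_length, new_sound, silence_split=False):
--     duration = len(new_sound)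
--     if duration == 0:
--         return []
--     section_length = recommended_section_length * 1000
--     full, rem = divmod(duration, section_length)
--     ranges = [x for i in range(full)
--                 for x in (i * section_length, (i + 1) * section_length)]
--     if rem:
--         ranges += [full * section_length, duration]
--     return ranges
-- ===== Notes on version B (the rewrite author's own statement) =====
-- stated objective: simpler
-- what changed: Replaces the subtract-and-clamp while loop (duration decrement, start accumulator, per-step if/else clamp) by closed-form arithmetic: divmod gives the number of full sections and the remainder, the boundaries are computed as i*section_length in one flat comprehension, with one optional final partial chunk.
-- outside the precondition, e.g. on audioRanges(0, [1, 2], False): A does not finish within the time limit, B raises ZeroDivisionError; on audioRanges(-1, [1], False): A does not finish within the time limit, B returns [1000, 1]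
import Mathlib
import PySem

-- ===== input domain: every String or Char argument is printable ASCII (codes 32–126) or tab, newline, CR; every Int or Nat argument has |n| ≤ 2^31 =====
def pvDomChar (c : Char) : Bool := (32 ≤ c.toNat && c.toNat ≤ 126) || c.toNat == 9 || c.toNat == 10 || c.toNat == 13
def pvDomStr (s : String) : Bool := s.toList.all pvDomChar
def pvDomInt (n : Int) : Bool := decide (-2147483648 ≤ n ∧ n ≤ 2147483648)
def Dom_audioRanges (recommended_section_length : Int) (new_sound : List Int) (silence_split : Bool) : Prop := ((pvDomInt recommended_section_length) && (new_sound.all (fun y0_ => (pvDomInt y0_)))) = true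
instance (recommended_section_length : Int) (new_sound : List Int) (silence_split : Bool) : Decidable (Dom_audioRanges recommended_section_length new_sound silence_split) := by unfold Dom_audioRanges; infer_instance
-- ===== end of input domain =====

-- B replaces A's subtract-and-clamp while loop by divmod arithmetic plus a flat
-- comprehension over the full-section indices (objective: simpler).

-- ===== PORT A =====
-- A's while loop; fuel = initial duration (each iteration removes at least 1
-- whenever the loop terminates at all, i.e. on Pre_).
def pvALoop (L : Int) : Nat → Int → Int → List Int → List Int
  | 0, _, _, acc => acc
  | fuel + 1, duration, start_range, range_list =>
    if duration = 0 then range_list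
    else
      let sec := if duration ≤ L then duration else L
      let stop_range := start_range + sec
      pvALoop L fuel (duration - sec) stop_range (range_list ++ [start_range, stop_range])

def audioRanges (recommended_section_length : Int) (new_sound : List Int) (silence_split : Bool) : List Int :=
  pvALoop (recommended_section_length * 1000) new_sound.length (new_sound.length : Int) 0 []

-- ===== PORT B =====
def audioRanges_alt (recommended_section_length : Int) (new_sound : List Int) (silence_split : Bool) : List Int :=
  let duration : Int := new_sound.length
  if duration = 0 then []
  else
    let L := recommended_section_length * 1000
    match PySem.Int.divmod? duration L with
    | none => []   -- divmod raises ZeroDivisionError on L = 0; outside Pre_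
    | some (full, rem) =>
      let ranges := (PySem.List.pyRange 0 full 1).flatMap (fun i => [i * L, (i + 1) * L])
      if rem ≠ 0 then ranges ++ [full * L, duration] else ranges

-- ===== PRECONDITION & SPEC =====
-- Pre_ excludes nonempty input with recommended_section_length ≤ 0: there A's
-- while loop never terminates (the chunk size is ≤ 0, so duration never reaches 0).
def Pre_audioRanges (recommended_section_length : Int) (new_sound : List Int) (silence_split : Bool) : Prop :=
  new_sound = [] ∨ 1 ≤ recommended_section_length
instance (recommended_section_length : Int) (new_sound : List Int) (silence_split : Bool) : Decidable (Pre_audioRanges recommended_section_length new_sound silence_split) := by unfold Pre_audioRanges; infer_instance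

def pvWitness_audioRanges : Int × List Int × Bool := (2, [1, 2, 3], false)

def Spec_audioRanges (recommended_section_length : Int) (new_sound : List Int) (silence_split : Bool) (out : List Int) : Prop := out = audioRanges_alt recommended_section_length new_sound silence_split
instance (recommended_section_length : Int) (new_sound : List Int) (silence_split : Bool) (out : List Int) : Decidable (Spec_audioRanges recommended_section_length new_sound silence_split out) := by unfold Spec_audioRanges; infer_instance

-- ===== CLAIM (what is proved, stated in full; the proofs are below) =====
def Claim_equal_audioRanges : Prop := ∀ (recommended_section_length : Int) (new_sound : List Int) (silence_split : Bool), Dom_audioRanges recommended_section_length new_sound silence_split → Pre_audioRanges recommended_section_length new_sound silence_split → Spec_audioRanges recommended_section_length new_sound silence_split (audioRanges recommended_section_length new_sound silence_split)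

-- ===== LEMMAS AND PROOFS =====

-- A's loop, on duration = q*L + r with 0 ≤ r < L, emits q full chunks then
-- (if r ≠ 0) one partial chunk.
lemma pvALoop_spec : ∀ (q : Nat) (L r start : Int) (acc : List Int) (fuel : Nat),
    1 ≤ L → 0 ≤ r → r < L → q + (if r = 0 then 0 else 1) ≤ fuel →
    pvALoop L fuel ((q : Int) * L + r) start acc =
      acc ++ (List.range q).flatMap (fun (i : Nat) => [start + (i : Int) * L, start + ((i : Int) + 1) * L])
          ++ (if r = 0 then [] else [start + (q : Int) * L, start + (q : Int) * L + r]) := by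
  intro q
  induction q with
  | zero =>
    intro L r start acc fuel hL hr0 hrL hfuel
    by_cases hr : r = 0
    · subst hr
      cases fuel <;> simp [pvALoop]
    · simp only [if_neg hr] at hfuel
      obtain ⟨f, rfl⟩ : ∃ f, fuel = f + 1 := ⟨fuel - 1, by omega⟩
      have hd : ((0 : Nat) : Int) * L + r ≠ 0 := by push_cast; omega
      have hle : ((0 : Nat) : Int) * L + r ≤ L := by push_cast; omega
      have hzero : ((0 : Nat) : Int) * L + r - (((0 : Nat) : Int) * L + r) = 0 := by ring
      simp only [pvALoop, if_neg hd, if_pos hle, hzero]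
      cases f <;> simp [pvALoop, hr]
  | succ q ih =>
    intro L r start acc fuel hL hr0 hrL hfuel
    have hqL : (0 : Int) ≤ (q : Int) * L := by positivity
    have hd : ((q + 1 : Nat) : Int) * L + r ≠ 0 := by push_cast; nlinarith
    obtain ⟨f, rfl⟩ : ∃ f, fuel = f + 1 := ⟨fuel - 1, by omega⟩
    simp only [pvALoop, if_neg hd]
    have hsec : (if ((q + 1 : Nat) : Int) * L + r ≤ L then ((q + 1 : Nat) : Int) * L + r else L) = L := by
      split_ifs with h
      · push_cast at h ⊢; nlinarith
      · rfl
    rw [hsec]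
    have harg : ((q + 1 : Nat) : Int) * L + r - L = (q : Int) * L + r := by push_cast; ring
    rw [harg]
    rw [ih L r (start + L) (acc ++ [start, start + L]) f hL hr0 hrL (by omega)]
    have hrange : (List.range (q + 1)).flatMap (fun (i : Nat) => [start + (i : Int) * L, start + ((i : Int) + 1) * L])
        = [start, start + L] ++ (List.range q).flatMap (fun (i : Nat) => [start + L + (i : Int) * L, start + L + ((i : Int) + 1) * L]) := by
      rw [List.range_succ_eq_map, List.flatMap_cons, List.flatMap_map]
      congr 1
      · norm_num
      · refine congrArg (fun f => List.flatMap f (List.range q)) ?_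
        funext a
        simp only [Nat.succ_eq_add_one, List.cons.injEq, and_true]
        push_cast
        constructor <;> ring
    rw [hrange]
    have htail : (start + L + (q : Int) * L) = start + ((q + 1 : Nat) : Int) * L := by push_cast; ring
    by_cases hr : r = 0 <;> simp [hr, htail, List.append_assoc]

-- empty input: both return []
lemma audioRanges_nil (rsl : Int) (ss : Bool) :
    audioRanges rsl [] ss = audioRanges_alt rsl [] ss := by
  simp [audioRanges, audioRanges_alt, pvALoop]

-- ===== VERDICT (by name: the statement is the Claim_ definition above) =====
theorem audioRanges_spec : Claim_equal_audioRanges := by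
  intro rsl ns ss _hDom hPre
  unfold Spec_audioRanges
  rcases hPre with h | hrsl
  · subst h; exact (audioRanges_nil rsl ss).symm
  rcases Nat.eq_zero_or_pos ns.length with hlen | hlen
  · rw [List.length_eq_zero_iff] at hlen
    subst hlen; exact (audioRanges_nil rsl ss).symm
  -- nonempty list, positive section length
  set L : Int := rsl * 1000 with hLdef
  have hL : 1 ≤ L := by simp [hLdef]; nlinarith
  have hLne : L ≠ 0 := by omega
  set d : Int := (ns.length : Int) with hddef
  have hd0 : 0 < d := by simp [hddef]; omega
  set full : Int := PySem.Int.floordiv d L with hfull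
  set rem : Int := PySem.Int.mod d L with hrem
  have hsplit : full * L + rem = d := PySem.Int.floordiv_mul_add_mod d L
  have hrem0 : 0 ≤ rem := PySem.Int.mod_nonneg d (by omega)
  have hremL : rem < L := PySem.Int.mod_lt d (by omega)
  have hfull0 : 0 ≤ full := by nlinarith
  -- A's side via the loop lemma with q = full.toNat, r = rem
  have hq : (full.toNat : Int) = full := Int.toNat_of_nonneg hfull0
  have hfuel : full.toNat + (if rem = 0 then 0 else 1) ≤ ns.length := by
    have h1 : full ≤ full * L := by nlinarith
    by_cases hr : rem = 0 <;> simp [hr] <;> omega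
  have hA : audioRanges rsl ns ss =
      [] ++ (List.range full.toNat).flatMap (fun (i : Nat) => [0 + (i : Int) * L, 0 + ((i : Int) + 1) * L])
         ++ (if rem = 0 then [] else [0 + (full.toNat : Int) * L, 0 + (full.toNat : Int) * L + rem]) := by
    unfold audioRanges
    rw [← hLdef, ← hddef, show d = (full.toNat : Int) * L + rem by rw [hq]; omega]
    exact pvALoop_spec full.toNat L rem 0 [] ns.length hL hrem0 hremL hfuel
  -- B's side
  have hB : audioRanges_alt rsl ns ss =
      (List.range full.toNat).flatMap (fun (i : Nat) => [(i : Int) * L, ((i : Int) + 1) * L])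
        ++ (if rem = 0 then [] else [full * L, d]) := by
    have hdm : PySem.Int.divmod? d L = some (full, rem) := by
      simp [PySem.Int.divmod?, PySem.Int.floordiv, PySem.Int.mod, hLne, hfull, hrem]
    unfold audioRanges_alt
    simp only [← hddef, if_neg (show ¬ d = 0 by omega), ← hLdef, hdm]
    have hpr : PySem.List.pyRange 0 full 1 = (List.range full.toNat).map (fun k : Nat => (k : Int)) := by
      rw [PySem.List.pyRange_one]
      simp
    rw [hpr, List.flatMap_map]
    by_cases hr : rem = 0 <;> simp [hr]
  rw [hA, hB]
  have hd' : d = full * L + rem := by omega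
  by_cases hr : rem = 0 <;> simp [hr, hq, hd']
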